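-- pv_equiv track=rewrite | github.com/matt8877/Lilly_Data_Engineer_Challenge | answers.py | top_scorer_for_tourn
-- ===== SOURCE A (Python) =====
-- def top_scorer_for_tourn(number_of_goals_tourn):
--     max_values = {}
--     for tuple_goal in number_of_goals_tourn:
--         identifier, _, value = tuple_goal
--         if identifier not in max_values or value > max_values[identifier]:
--             max_values[identifier] = value
--
--     result = [tuple_goal for tuple_goal in number_of_goals_tourn if tuple_goal[2] == max_values[tuple_goal[0]]]
--     return result
-- ===== SOURCE B (Python) =====
-- def top_scorer_for_tourn(number_of_goals_tourn):
--     # keep a tuple iff no tuple with the same identifier has a strictly larger value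
--     return [t for t in number_of_goals_tourn
--             if all(v <= t[2] for (i, _, v) in number_of_goals_tourn if i == t[0])]
-- ===== Notes on version B (the rewrite author's own statement) =====
-- stated objective: simpler
-- what changed: Replaced the running-max dictionary pass followed by a lookup-based filter with a single dictionary-free comprehension that keeps a tuple iff no same-identifier tuple has a strictly larger value.
import Mathlib
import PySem

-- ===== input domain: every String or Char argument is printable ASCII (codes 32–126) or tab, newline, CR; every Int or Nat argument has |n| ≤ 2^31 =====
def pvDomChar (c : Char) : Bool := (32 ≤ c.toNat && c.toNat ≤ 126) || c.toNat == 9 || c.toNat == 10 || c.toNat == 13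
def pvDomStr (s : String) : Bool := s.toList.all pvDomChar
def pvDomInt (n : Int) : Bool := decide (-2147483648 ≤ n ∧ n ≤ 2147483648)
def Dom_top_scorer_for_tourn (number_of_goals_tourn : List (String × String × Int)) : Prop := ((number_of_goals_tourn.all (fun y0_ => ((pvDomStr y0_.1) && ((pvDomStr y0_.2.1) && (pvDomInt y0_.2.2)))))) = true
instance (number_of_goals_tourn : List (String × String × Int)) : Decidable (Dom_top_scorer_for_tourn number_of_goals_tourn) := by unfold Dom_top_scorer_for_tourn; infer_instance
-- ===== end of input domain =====

-- B drops A's running-max dictionary: it keeps a tuple iff no same-identifier tuple has a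
-- strictly larger value (simpler, dictionary-free; same output order and tie behaviour).

-- ===== PORT A =====
def top_scorer_for_tourn (number_of_goals_tourn : List (String × String × Int)) : List (String × String × Int) :=
  let max_values : PySem.Dict String Int :=
    number_of_goals_tourn.foldl
      (fun d t =>
        if (match d.get? t.1 with
            | none => true
            | some m => decide (m < t.2.2)) then d.insert t.1 t.2.2 else d)
      PySem.Dict.empty
  number_of_goals_tourn.filter
    (fun t => match max_values.get? t.1 with
      | some m => decide (t.2.2 = m)
      | none => false)  -- the none branch is unreachable: every identifier of the list was inserted

-- ===== PORT B =====
def top_scorer_for_tourn_alt (number_of_goals_tourn : List (String × String × Int)) : List (String × String × Int) :=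
  number_of_goals_tourn.filter
    (fun t => number_of_goals_tourn.all
      (fun u => if u.1 = t.1 then decide (u.2.2 ≤ t.2.2) else true))

-- ===== PRECONDITION & SPEC =====
def Spec_top_scorer_for_tourn (number_of_goals_tourn : List (String × String × Int)) (out : List (String × String × Int)) : Prop := out = top_scorer_for_tourn_alt number_of_goals_tourn
instance (number_of_goals_tourn : List (String × String × Int)) (out : List (String × String × Int)) : Decidable (Spec_top_scorer_for_tourn number_of_goals_tourn out) := by unfold Spec_top_scorer_for_tourn; infer_instance

-- ===== CLAIM (what is proved, stated in full; the proofs are below) =====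
def Claim_equal_top_scorer_for_tourn : Prop := ∀ (number_of_goals_tourn : List (String × String × Int)), Dom_top_scorer_for_tourn number_of_goals_tourn → Spec_top_scorer_for_tourn number_of_goals_tourn (top_scorer_for_tourn number_of_goals_tourn)

-- ===== LEMMAS AND PROOFS =====

-- A's loop body as a named step function (proof-side only)
def pvStep (d : PySem.Dict String Int) (t : String × String × Int) : PySem.Dict String Int :=
  if (match d.get? t.1 with
      | none => true
      | some m => decide (m < t.2.2)) then d.insert t.1 t.2.2 else d

-- running max of a list of values, started from an optional seed
def pvRunmax (o : Option Int) (vs : List Int) : Option Int :=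
  vs.foldl (fun o v => some (match o with | none => v | some m => if m < v then v else m)) o

lemma portA_eq (xs : List (String × String × Int)) :
    top_scorer_for_tourn xs
      = xs.filter (fun t =>
          match (xs.foldl pvStep PySem.Dict.empty).get? t.1 with
          | some m => decide (t.2.2 = m)
          | none => false) := rfl

lemma fold_get (xs : List (String × String × Int)) (d : PySem.Dict String Int) (k : String) :
    (xs.foldl pvStep d).get? k
      = pvRunmax (d.get? k) ((xs.filter (fun t => t.1 = k)).map (fun t => t.2.2)) := by
  induction xs generalizing d with
  | nil => rfl
  | cons t xs ih =>
    rw [List.foldl_cons, ih]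
    by_cases hk : t.1 = k
    · have hstep : (pvStep d t).get? k
          = some (match d.get? k with | none => t.2.2 | some m => if m < t.2.2 then t.2.2 else m) := by
        unfold pvStep
        rw [← hk]
        cases h : d.get? t.1 with
        | none => simp [PySem.Dict.get?_insert_self]
        | some m =>
          by_cases hlt : m < t.2.2
          · simp [hlt, PySem.Dict.get?_insert_self]
          · simp [h, hlt]
      rw [hstep]
      simp only [List.filter_cons, hk, decide_true]
      rfl
    · have hstep : (pvStep d t).get? k = d.get? k := by
        unfold pvStep
        by_cases hin : (match d.get? t.1 with | none => true | some m => decide (m < t.2.2)) = true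
        · rw [if_pos hin, PySem.Dict.get?_insert, if_neg (fun h => hk h.symm)]
        · rw [if_neg hin]
      rw [hstep]
      simp [hk]

lemma pvRunmax_spec : ∀ (vs : List Int) (o : Option Int), o.isSome = true ∨ vs ≠ [] →
    ∃ m, pvRunmax o vs = some m ∧ (o = some m ∨ m ∈ vs) ∧ (∀ v ∈ vs, v ≤ m) ∧
      (∀ w, o = some w → w ≤ m) := by
  intro vs
  induction vs with
  | nil =>
    intro o h
    cases o with
    | none => simp at h
    | some m => exact ⟨m, rfl, Or.inl rfl, by simp, by simp⟩
  | cons v vs ih =>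
    intro o _
    cases o with
    | none =>
      obtain ⟨m, hm, hmem, hub, hseed⟩ := ih (some v) (Or.inl rfl)
      have hvm : v ≤ m := hseed v rfl
      refine ⟨m, hm, Or.inr ?_, ?_, by simp⟩
      · rcases hmem with h | h
        · simp [← Option.some_inj.mp h]
        · exact List.mem_cons_of_mem _ h
      · intro u hu
        rcases List.mem_cons.mp hu with h | h
        · omega
        · exact hub u h
    | some m0 =>
      obtain ⟨m, hm, hmem, hub, hseed⟩ := ih (some (if m0 < v then v else m0)) (Or.inl rfl)
      have hcm : (if m0 < v then v else m0) ≤ m := hseed _ rfl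
      have hvc : v ≤ if m0 < v then v else m0 := by split <;> omega
      have hm0c : m0 ≤ if m0 < v then v else m0 := by split <;> omega
      refine ⟨m, hm, ?_, ?_, ?_⟩
      · rcases hmem with h | h
        · have hcme := Option.some_inj.mp h
          by_cases hlt : m0 < v
          · right
            rw [if_pos hlt] at hcme
            simp [← hcme]
          · left
            rw [if_neg hlt] at hcme
            rw [hcme]
        · exact Or.inr (List.mem_cons_of_mem _ h)
      · intro u hu
        rcases List.mem_cons.mp hu with h | h
        · omega
        · exact hub u h
      · intro w hw
        have := Option.some_inj.mp hw
        omega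

-- ===== VERDICT (by name: the statement is the Claim_ definition above) =====
theorem top_scorer_for_tourn_spec : Claim_equal_top_scorer_for_tourn := by
  intro xs _
  show top_scorer_for_tourn xs = top_scorer_for_tourn_alt xs
  rw [portA_eq]
  unfold top_scorer_for_tourn_alt
  apply List.filter_congr
  intro t ht
  have hmem : t.2.2 ∈ (xs.filter (fun u => u.1 = t.1)).map (fun u => u.2.2) := by
    simp only [List.mem_map, List.mem_filter, decide_eq_true_eq]
    exact ⟨t, ⟨ht, rfl⟩, rfl⟩
  obtain ⟨m, heq, hmemm, hub, _⟩ :=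
    pvRunmax_spec ((xs.filter (fun u => decide (u.1 = t.1))).map (fun u => u.2.2)) none
      (Or.inr (fun h => by rw [h] at hmem; simp at hmem))
  rw [fold_get, PySem.Dict.get?_empty, heq]
  have hmvs : m ∈ (xs.filter (fun u => u.1 = t.1)).map (fun u => u.2.2) := by
    rcases hmemm with h | h
    · exact absurd h (by simp)
    · exact h
  rw [← Bool.coe_iff_coe]
  simp only [decide_eq_true_eq, List.all_eq_true]
  constructor
  · intro hv u hu
    by_cases hid : u.1 = t.1
    · simp only [hid, if_true, decide_eq_true_eq]
      have : u.2.2 ≤ m := hub u.2.2 (by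
        simp only [List.mem_map, List.mem_filter, decide_eq_true_eq]
        exact ⟨u, ⟨hu, hid⟩, rfl⟩)
      omega
    · simp [hid]
  · intro hall
    have h1 : t.2.2 ≤ m := hub t.2.2 hmem
    obtain ⟨u, ⟨huin, huid⟩, huval⟩ := by
      simpa only [List.mem_map, List.mem_filter, decide_eq_true_eq] using hmvs
    have := hall u huin
    rw [if_pos huid] at this
    simp only [decide_eq_true_eq] at this
    omega
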